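-- pv_equiv track=rewrite | github.com/midnightbot/leetcode_solutions | python3_solution_set2/2449. Minimum Number of Operations to Make Arrays Similar.py | makeSimilar
-- ===== SOURCE A (Python) =====
-- from typing import List
--
-- def makeSimilar(nums: List[int], target: List[int]) -> int:
--
--
--     numseven = sorted([x for x in nums if x%2==0])
--     numsodd = sorted([x for x in nums if x%2!=0])
--
--     targeteven = sorted([x for x in target if x%2==0])
--     targetodd = sorted([x for x in target if x%2!=0])
--
--
--     sum1 = sum([abs(numseven[x]-targeteven[x]) for x in range(len(numseven))])
--     sum2 = sum([abs(numsodd[x]-targetodd[x]) for x in range(len(numsodd))])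
--
--     return (sum1 + sum2)//4
-- ===== SOURCE B (Python) =====
-- def makeSimilar(nums, target):
--     # selection-based greedy: repeatedly pull the smallest remaining num and
--     # match it with the smallest remaining target of the same parity
--     ns = list(nums)
--     ts = list(target)
--     total = 0
--     while ns:
--         a = min(ns)
--         ns.remove(a)
--         b = min(t for t in ts if t % 2 == a % 2)
--         ts.remove(b)
--         total += abs(a - b)
--     return total // 4
-- ===== Notes on version B (the rewrite author's own statement) =====
-- stated objective: alternative
-- what changed: Replaces A's four parity-filtered sorts plus two index-based difference sums with a sort-free selection loop that repeatedly extracts the smallest remaining num and pairs it with the smallest same-parity remaining target, accumulating |a-b| in one pass over a shrinking pool.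
import Mathlib
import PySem

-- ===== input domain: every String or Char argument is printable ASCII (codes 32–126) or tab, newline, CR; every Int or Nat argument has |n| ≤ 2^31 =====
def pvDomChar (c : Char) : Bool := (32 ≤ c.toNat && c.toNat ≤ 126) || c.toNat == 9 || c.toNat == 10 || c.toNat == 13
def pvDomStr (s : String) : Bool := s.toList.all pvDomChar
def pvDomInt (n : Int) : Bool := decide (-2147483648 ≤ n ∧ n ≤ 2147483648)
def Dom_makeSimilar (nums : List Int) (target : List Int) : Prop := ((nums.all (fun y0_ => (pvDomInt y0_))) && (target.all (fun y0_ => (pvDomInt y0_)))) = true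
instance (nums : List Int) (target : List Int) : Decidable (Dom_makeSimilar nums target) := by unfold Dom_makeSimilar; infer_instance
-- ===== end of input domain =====

-- B replaces A's four parity-filtered sorts and two index-based sums by a sort-free selection
-- loop: repeatedly extract the smallest remaining num and the smallest same-parity target
-- (alternative decomposition; not faster).

-- ===== PORT A =====
-- pyGetD's default 0 is only reached where Python raises IndexError; Pre_ excludes those inputs.
def makeSimilar (nums : List Int) (target : List Int) : Int :=
  let numseven := PySem.List.sorted (nums.filter (fun x => PySem.Int.mod x 2 == 0)) (fun x => x) false
  let numsodd := PySem.List.sorted (nums.filter (fun x => PySem.Int.mod x 2 != 0)) (fun x => x) false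
  let targeteven := PySem.List.sorted (target.filter (fun x => PySem.Int.mod x 2 == 0)) (fun x => x) false
  let targetodd := PySem.List.sorted (target.filter (fun x => PySem.Int.mod x 2 != 0)) (fun x => x) false
  let sum1 := ((PySem.List.pyRange 0 (numseven.length : Int) 1).map
      (fun x => |PySem.List.pyGetD numseven x 0 - PySem.List.pyGetD targeteven x 0|)).sum
  let sum2 := ((PySem.List.pyRange 0 (numsodd.length : Int) 1).map
      (fun x => |PySem.List.pyGetD numsodd x 0 - PySem.List.pyGetD targetodd x 0|)).sum
  PySem.Int.floordiv (sum1 + sum2) 4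

-- ===== PORT B =====
-- termination helper for the while loop: list.remove shortens the list
theorem pvRemoveLen {xs l : List Int} {v : Int} (h : PySem.List.remove? xs v = some l) :
    l.length < xs.length := by
  have hv : v ∈ xs := by
    by_contra hmem
    rw [(PySem.List.remove?_eq_none_iff xs v).mpr hmem] at h
    simp at h
  rw [PySem.List.remove?_eq_some_erase xs v hv] at h
  cases h
  have h1 := List.length_erase_of_mem hv
  have h2 : 0 < xs.length := List.length_pos_of_mem hv
  omega

-- the while loop of B: a = min(ns); ns.remove(a); b = min(same-parity ts); ts.remove(b).
-- The `none` fallbacks returning `total` are unreachable except for the empty generator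
-- (Python's ValueError), which Pre_ excludes.
def bLoop (ns ts : List Int) (total : Int) : Int :=
  if ns.isEmpty then total
  else
    match PySem.List.min? ns (fun x => x) with
    | none => total
    | some a =>
      match hr : PySem.List.remove? ns a with
      | none => total
      | some ns' =>
        match PySem.List.min? (ts.filter (fun t => PySem.Int.mod t 2 == PySem.Int.mod a 2)) (fun x => x) with
        | none => total
        | some b =>
          match PySem.List.remove? ts b with
          | none => total
          | some ts' => bLoop ns' ts' (total + |a - b|)
termination_by ns.length
decreasing_by exact pvRemoveLen hr

def makeSimilar_alt (nums : List Int) (target : List Int) : Int :=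
  PySem.Int.floordiv (bLoop nums target 0) 4

-- ===== PRECONDITION & SPEC =====
-- Pre_ excludes exactly the inputs where A raises IndexError (and B raises ValueError):
-- some parity group of target strictly shorter than the same parity group of nums.
def Pre_makeSimilar (nums : List Int) (target : List Int) : Prop :=
  nums.countP (fun x => decide (x % 2 = 0)) ≤ target.countP (fun x => decide (x % 2 = 0)) ∧
  nums.countP (fun x => decide (x % 2 = 1)) ≤ target.countP (fun x => decide (x % 2 = 1))
instance (nums : List Int) (target : List Int) : Decidable (Pre_makeSimilar nums target) := by
  unfold Pre_makeSimilar; infer_instance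
def pvWitness_makeSimilar : List Int × List Int := ([2, 1], [4, 3])

def Spec_makeSimilar (nums : List Int) (target : List Int) (out : Int) : Prop := out = makeSimilar_alt nums target
instance (nums : List Int) (target : List Int) (out : Int) : Decidable (Spec_makeSimilar nums target out) := by unfold Spec_makeSimilar; infer_instance

-- ===== CLAIM =====
def Claim_equal_makeSimilar : Prop := ∀ (nums : List Int) (target : List Int), Dom_makeSimilar nums target → Pre_makeSimilar nums target → Spec_makeSimilar nums target (makeSimilar nums target)

-- ===== LEMMAS AND PROOFS =====

-- abbreviations used only by the proofs
def sortI (xs : List Int) : List Int := PySem.List.sorted xs (fun x => x) false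
def zipsum (as bs : List Int) : Int := ((as.zip bs).map (fun p => |p.1 - p.2|)).sum

-- A's index-based difference sum is the zip sum, when target's group is at least as long
lemma sum_idx_eq_zipsum (as bs : List Int) (h : as.length ≤ bs.length) :
    ((PySem.List.pyRange 0 (as.length : Int) 1).map
        (fun x => |PySem.List.pyGetD as x 0 - PySem.List.pyGetD bs x 0|)).sum
      = zipsum as bs := by
  unfold zipsum
  rw [PySem.List.pyRange_zero_nat, List.map_map]
  congr 1
  apply List.ext_getElem
  · simp only [List.length_map, List.length_range, List.length_zip]
    omega
  · intro i h1 h2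
    have hia : i < as.length := by simpa using h1
    have hib : i < bs.length := lt_of_lt_of_le hia h
    simp [PySem.List.pyGetD_natCast, List.getElem_zip, List.getD_eq_getElem?_getD, hia, hib]

-- a minimum can be peeled off the front of the sorted list
lemma sortI_cons_min {xs : List Int} {m : Int} (hm : m ∈ xs) (hle : ∀ y ∈ xs, m ≤ y) :
    sortI xs = m :: sortI (xs.erase m) := by
  apply PySem.List.sorted_id_eq_of_perm_of_pairwise
  · exact ((PySem.List.sorted_perm _ _ _).cons m).trans (List.perm_cons_erase hm).symm
  · exact List.Pairwise.cons
      (fun y hy => hle y (List.mem_of_mem_erase ((PySem.List.mem_sorted _ _ _ _).mp hy)))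
      (PySem.List.sorted_pairwise _ _)

-- even/odd counting via Lean's % agrees with A's parity filters (Python % with positive divisor)
lemma countP_even_eq (xs : List Int) :
    xs.countP (fun x => decide (x % 2 = 0))
      = (xs.filter (fun x => PySem.Int.mod x 2 == 0)).length := by
  rw [← List.countP_eq_length_filter]
  apply List.countP_congr
  intro x _
  rw [PySem.Int.mod_eq_emod_of_pos (by norm_num)]
  rw [Bool.eq_iff_iff]
  simp

lemma countP_odd_eq (xs : List Int) :
    xs.countP (fun x => decide (x % 2 = 1))
      = (xs.filter (fun x => PySem.Int.mod x 2 != 0)).length := by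
  rw [← List.countP_eq_length_filter]
  apply List.countP_congr
  intro x _
  rw [PySem.Int.mod_eq_emod_of_pos (by norm_num)]
  rw [Bool.eq_iff_iff]
  simp only [decide_eq_true_eq, bne_iff_ne, ne_eq, iff_true]
  omega

-- the odd class can also be filtered by `mod = 1`
lemma odd_filter_eq (xs : List Int) :
    xs.filter (fun x => PySem.Int.mod x 2 == 1)
      = xs.filter (fun x => PySem.Int.mod x 2 != 0) := by
  apply List.filter_congr
  intro x _
  rcases PySem.Int.mod_two_eq x with h | h <;> rw [h] <;> rfl

-- zip sum peels one pair
lemma zipsum_cons (a b : Int) (as bs : List Int) :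
    zipsum (a :: as) (b :: bs) = |a - b| + zipsum as bs := by
  simp [zipsum]

-- one selection step peels |a - b| off the p-class pairing and leaves the q-class untouched
lemma step_main (ns ts : List Int) (a b : Int) (p q : Int → Bool)
    (hpa : p a = true) (hqa : q a = false)
    (hmem : a ∈ ns) (hle : ∀ y ∈ ns, a ≤ y)
    (hb : PySem.List.min? (ts.filter p) (fun x => x) = some b)
    (hqb : q b = false) :
    |a - b| + (zipsum (sortI ((ns.erase a).filter p)) (sortI ((ts.erase b).filter p))
             + zipsum (sortI ((ns.erase a).filter q)) (sortI ((ts.erase b).filter q)))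
      = zipsum (sortI (ns.filter p)) (sortI (ts.filter p))
        + zipsum (sortI (ns.filter q)) (sortI (ts.filter q)) := by
  have hbmem : b ∈ ts.filter p := PySem.List.min?_mem hb
  have hbts : b ∈ ts := (List.mem_filter.mp hbmem).1
  have hble : ∀ y ∈ ts.filter p, b ≤ y := PySem.List.min?_id_le hb
  have hamemp : a ∈ ns.filter p := List.mem_filter.mpr ⟨hmem, hpa⟩
  have halep : ∀ y ∈ ns.filter p, a ≤ y := fun y hy => hle y (List.mem_filter.mp hy).1
  have haq : a ∉ ns.filter q := fun h => by simp [List.mem_filter, hqa] at h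
  have hbq : b ∉ ts.filter q := fun h => by simp [List.mem_filter, hqb] at h
  rw [← List.erase_filter (f := p) (l := ns), ← List.erase_filter (f := p) (l := ts),
      ← List.erase_filter (f := q) (l := ns), ← List.erase_filter (f := q) (l := ts)]
  rw [List.erase_of_not_mem haq, List.erase_of_not_mem hbq]
  rw [sortI_cons_min hamemp halep, sortI_cons_min hbmem hble, zipsum_cons]
  ring

-- the selection loop computes the two sorted-pairing sums
lemma bLoop_eq (k : Nat) : ∀ (ns ts : List Int) (total : Int), ns.length = k →
    (ns.filter (fun x => PySem.Int.mod x 2 == 0)).length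
      ≤ (ts.filter (fun x => PySem.Int.mod x 2 == 0)).length →
    (ns.filter (fun x => PySem.Int.mod x 2 != 0)).length
      ≤ (ts.filter (fun x => PySem.Int.mod x 2 != 0)).length →
    bLoop ns ts total
      = total + (zipsum (sortI (ns.filter (fun x => PySem.Int.mod x 2 == 0)))
                        (sortI (ts.filter (fun x => PySem.Int.mod x 2 == 0)))
               + zipsum (sortI (ns.filter (fun x => PySem.Int.mod x 2 != 0)))
                        (sortI (ts.filter (fun x => PySem.Int.mod x 2 != 0)))) := by
  induction k using Nat.strong_induction_on with
  | _ k ih =>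
    intro ns ts total hk he ho
    match ns, hk with
    | [], _ =>
      rw [bLoop]
      simp [sortI, zipsum]
      rfl
    | n :: ns0, hk =>
      rw [bLoop]
      rw [if_neg (by simp)]
      have hne : (PySem.List.min? (n :: ns0) (fun x => x)).isSome := by
        cases hmin : PySem.List.min? (n :: ns0) (fun x => x) with
        | none => exact absurd ((PySem.List.min?_eq_none_iff _ _).mp hmin) (by simp)
        | some a => rfl
      obtain ⟨a, hmin⟩ := Option.isSome_iff_exists.mp hne
      have ha_mem : a ∈ n :: ns0 := PySem.List.min?_mem hmin
      have ha_le : ∀ y ∈ n :: ns0, a ≤ y := PySem.List.min?_id_le hmin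
      rw [hmin]
      rcases PySem.Int.mod_two_eq a with hp | hp
      · -- a is even
        simp only [hp]
        have hae : a ∈ (n :: ns0).filter (fun x => PySem.Int.mod x 2 == 0) :=
          List.mem_filter.mpr ⟨ha_mem, by rw [hp]; rfl⟩
        split
        · next heq =>
          exact absurd ((PySem.List.remove?_eq_none_iff _ _).mp heq) (not_not.mpr ha_mem)
        · next ns' heq =>
          rw [PySem.List.remove?_eq_some_erase _ a ha_mem] at heq
          obtain rfl : ns' = (n :: ns0).erase a := (Option.some.inj heq).symm
          split
          · next hfil =>
            have h0 : (ts.filter (fun x => PySem.Int.mod x 2 == 0)).length = 0 := by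
              rw [(PySem.List.min?_eq_none_iff _ _).mp hfil]; rfl
            have h1 : 0 < ((n :: ns0).filter (fun x => PySem.Int.mod x 2 == 0)).length :=
              List.length_pos_of_mem hae
            omega
          · next b hb =>
            have hbe : b ∈ ts.filter (fun x => PySem.Int.mod x 2 == 0) := PySem.List.min?_mem hb
            have hbts : b ∈ ts := (List.mem_filter.mp hbe).1
            have hbq : (fun x => PySem.Int.mod x 2 != 0) b = false := by
              have h2 := (List.mem_filter.mp hbe).2
              simp only [beq_iff_eq] at h2
              show (PySem.Int.mod b 2 != 0) = false
              rw [h2]; rfl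
            have haq : (fun x => PySem.Int.mod x 2 != 0) a = false := by
              show (PySem.Int.mod a 2 != 0) = false
              rw [hp]; rfl
            split
            · next heq2 =>
              exact absurd ((PySem.List.remove?_eq_none_iff _ _).mp heq2) (not_not.mpr hbts)
            · next ts' heq2 =>
              rw [PySem.List.remove?_eq_some_erase _ b hbts] at heq2
              obtain rfl : ts' = ts.erase b := (Option.some.inj heq2).symm
              have hlt : ((n :: ns0).erase a).length < k := by
                rw [List.length_erase_of_mem ha_mem]
                simp only [List.length_cons] at hk ⊢
                omega
              have he' : (((n :: ns0).erase a).filter (fun x => PySem.Int.mod x 2 == 0)).length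
                  ≤ ((ts.erase b).filter (fun x => PySem.Int.mod x 2 == 0)).length := by
                rw [← List.erase_filter, ← List.erase_filter,
                    List.length_erase_of_mem hae, List.length_erase_of_mem hbe]
                omega
              have ho' : (((n :: ns0).erase a).filter (fun x => PySem.Int.mod x 2 != 0)).length
                  ≤ ((ts.erase b).filter (fun x => PySem.Int.mod x 2 != 0)).length := by
                rw [← List.erase_filter, ← List.erase_filter,
                    List.erase_of_not_mem (fun h => by simp [List.mem_filter] at h; simp [h.2] at haq),
                    List.erase_of_not_mem (fun h => by simp [List.mem_filter] at h; simp [h.2] at hbq)]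
                exact ho
              rw [ih _ hlt _ _ _ rfl he' ho']
              have hstep := step_main (n :: ns0) ts a b
                (fun x => PySem.Int.mod x 2 == 0) (fun x => PySem.Int.mod x 2 != 0)
                (by show (PySem.Int.mod a 2 == 0) = true; rw [hp]; rfl) haq ha_mem ha_le hb hbq
              rw [← hstep]
              ring
      · -- a is odd
        simp only [hp]
        rw [odd_filter_eq ts]
        have hao : a ∈ (n :: ns0).filter (fun x => PySem.Int.mod x 2 != 0) :=
          List.mem_filter.mpr ⟨ha_mem, by rw [hp]; rfl⟩
        split
        · next heq =>
          exact absurd ((PySem.List.remove?_eq_none_iff _ _).mp heq) (not_not.mpr ha_mem)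
        · next ns' heq =>
          rw [PySem.List.remove?_eq_some_erase _ a ha_mem] at heq
          obtain rfl : ns' = (n :: ns0).erase a := (Option.some.inj heq).symm
          split
          · next hfil =>
            have h0 : (ts.filter (fun x => PySem.Int.mod x 2 != 0)).length = 0 := by
              rw [(PySem.List.min?_eq_none_iff _ _).mp hfil]; rfl
            have h1 : 0 < ((n :: ns0).filter (fun x => PySem.Int.mod x 2 != 0)).length :=
              List.length_pos_of_mem hao
            omega
          · next b hb =>
            have hbo : b ∈ ts.filter (fun x => PySem.Int.mod x 2 != 0) := PySem.List.min?_mem hb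
            have hbts : b ∈ ts := (List.mem_filter.mp hbo).1
            have hbq : (fun x => PySem.Int.mod x 2 == 0) b = false := by
              have h2 := (List.mem_filter.mp hbo).2
              show (PySem.Int.mod b 2 == 0) = false
              rcases PySem.Int.mod_two_eq b with hb2 | hb2
              · rw [hb2] at h2; exact absurd h2 (by decide)
              · rw [hb2]; rfl
            have haq : (fun x => PySem.Int.mod x 2 == 0) a = false := by
              show (PySem.Int.mod a 2 == 0) = false
              rw [hp]; rfl
            split
            · next heq2 =>
              exact absurd ((PySem.List.remove?_eq_none_iff _ _).mp heq2) (not_not.mpr hbts)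
            · next ts' heq2 =>
              rw [PySem.List.remove?_eq_some_erase _ b hbts] at heq2
              obtain rfl : ts' = ts.erase b := (Option.some.inj heq2).symm
              have hlt : ((n :: ns0).erase a).length < k := by
                rw [List.length_erase_of_mem ha_mem]
                simp only [List.length_cons] at hk ⊢
                omega
              have ho' : (((n :: ns0).erase a).filter (fun x => PySem.Int.mod x 2 != 0)).length
                  ≤ ((ts.erase b).filter (fun x => PySem.Int.mod x 2 != 0)).length := by
                rw [← List.erase_filter, ← List.erase_filter,
                    List.length_erase_of_mem hao, List.length_erase_of_mem hbo]
                omega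
              have he' : (((n :: ns0).erase a).filter (fun x => PySem.Int.mod x 2 == 0)).length
                  ≤ ((ts.erase b).filter (fun x => PySem.Int.mod x 2 == 0)).length := by
                rw [← List.erase_filter, ← List.erase_filter,
                    List.erase_of_not_mem (fun h => by simp [List.mem_filter] at h; simp [h.2] at haq),
                    List.erase_of_not_mem (fun h => by simp [List.mem_filter] at h; simp [h.2] at hbq)]
                exact he
              rw [ih _ hlt _ _ _ rfl he' ho']
              have hstep := step_main (n :: ns0) ts a b
                (fun x => PySem.Int.mod x 2 != 0) (fun x => PySem.Int.mod x 2 == 0)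
                (by show (PySem.Int.mod a 2 != 0) = true; rw [hp]; rfl) haq ha_mem ha_le hb hbq
              linarith [hstep]

-- ===== VERDICT =====
theorem makeSimilar_spec : Claim_equal_makeSimilar := by
  intro nums target _ hpre
  obtain ⟨he, ho⟩ := hpre
  rw [countP_even_eq, countP_even_eq] at he
  rw [countP_odd_eq, countP_odd_eq] at ho
  show makeSimilar nums target = makeSimilar_alt nums target
  simp only [makeSimilar, makeSimilar_alt]
  rw [bLoop_eq nums.length nums target 0 rfl he ho]
  have hle : (PySem.List.sorted (nums.filter (fun x => PySem.Int.mod x 2 == 0)) (fun x => x) false).length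
      ≤ (PySem.List.sorted (target.filter (fun x => PySem.Int.mod x 2 == 0)) (fun x => x) false).length := by
    simpa [PySem.List.length_sorted] using he
  have hlo : (PySem.List.sorted (nums.filter (fun x => PySem.Int.mod x 2 != 0)) (fun x => x) false).length
      ≤ (PySem.List.sorted (target.filter (fun x => PySem.Int.mod x 2 != 0)) (fun x => x) false).length := by
    simpa [PySem.List.length_sorted] using ho
  rw [sum_idx_eq_zipsum _ _ hle, sum_idx_eq_zipsum _ _ hlo]
  simp only [sortI]
  rw [zero_add]
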